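-- pv_equiv track=rewrite | github.com/taerimiiii/CodeTree | 241220/홀수 짝수의 묶음/odd-even-bundle.py | max_groups
-- ===== SOURCE A (Python) =====
-- def max_groups(n, numbers):
--     # 짝수와 홀수 분리
--     evens = [num for num in numbers if num % 2 == 0]
--     odds = [num for num in numbers if num % 2 == 1]
--
--     # 짝수와 홀수의 개수
--     even_count = len(evens)
--     odd_count = len(odds)
--
--     # 묶음 계산
--     groups = 0
--     current_even = True  # 첫 번째 묶음은 짝수
--
--     while even_count > 0 or odd_count > 0:
--         if current_even:  # 짝수 묶음 구성
--             if even_count > 0:  # 짝수 하나 사용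
--                 even_count -= 1
--                 groups += 1
--             elif odd_count >= 2:  # 홀수 2개로 짝수 합 만들기
--                 odd_count -= 2
--                 groups += 1
--             else:  # 더 이상 짝수를 만들 수 없음
--                 break
--         else:  # 홀수 묶음 구성
--             if odd_count >= 1:  # 홀수 하나 사용
--                 odd_count -= 1
--                 groups += 1
--             else:  # 더 이상 홀수를 만들 수 없음
--                 break
--
--     if even_count < 0 or odd_count < 0 :
--         # 묶음 계산
--         groups = 0
--         current_even = True  # 첫 번째 묶음은 짝수
--
--         while even_count > 0 or odd_count > 0:
--             if current_even:  # 짝수 묶음 구성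
--                 if even_count > 0:  # 짝수 하나 사용
--                     even_count -= 1
--                     groups += 1
--                 elif odd_count >= 2:  # 홀수 2개로 짝수 합 만들기
--                     odd_count -= 2
--                     groups += 1
--                 else:  # 더 이상 짝수를 만들 수 없음
--                     break
--             else:  # 홀수 묶음 구성
--                 if odd_count >= 3:  # 홀수 셋 사용
--                     odd_count -= 3
--                     groups += 1
--                 elif odd_count >= 1 :   # 홀수 하나 사용
--                     odd_count -= 1
--                     groups += 1
--                 else:  # 더 이상 홀수를 만들 수 없음
--                     break
--
--     if even_count < 0 or odd_count < 0 :
--         # 묶음 계산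
--         groups = 0
--         current_even = True  # 첫 번째 묶음은 짝수
--
--         while even_count > 0 or odd_count > 0:
--             if current_even:  # 짝수 묶음 구성
--                 if even_count > 0:  # 짝수 하나 사용
--                     even_count -= 1
--                     groups += 1
--                 elif odd_count >= 4:  # 홀수 4개로 짝수 합 만들기
--                     odd_count -= 4
--                     groups += 1
--                 elif odd_count >= 2:  # 홀수 2개로 짝수 합 만들기
--                     odd_count -= 2
--                     groups += 1
--                 else:  # 더 이상 짝수를 만들 수 없음
--                     break
--             else:  # 홀수 묶음 구성
--                 if odd_count >= 1:  # 홀수 하나 사용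
--                     odd_count -= 1
--                     groups += 1
--                 elif odd_count >= 3:  # 홀수 셋 사용
--                     odd_count -= 3
--                     groups += 1
--                 else:  # 더 이상 홀수를 만들 수 없음
--                     break
--
--
--         # 다음 묶음은 반대 (짝수 → 홀수 → 짝수 → ...)
--         current_even = not current_even
--
--     return groups
-- ===== SOURCE B (Python) =====
-- def max_groups(n, numbers):
--     even = 0
--     odd = 0
--     for num in numbers:
--         if num % 2 == 0:
--             even += 1
--         elif num % 2 == 1:
--             odd += 1
--     return even + odd // 2
-- ===== Notes on version B (the rewrite author's own statement) =====
-- stated objective: simpler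
-- what changed: A builds two filtered lists and runs a decrement loop (plus two dead repair loops); B counts evens and odds in one pass and returns even + odd//2 as a closed form.
import Mathlib
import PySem

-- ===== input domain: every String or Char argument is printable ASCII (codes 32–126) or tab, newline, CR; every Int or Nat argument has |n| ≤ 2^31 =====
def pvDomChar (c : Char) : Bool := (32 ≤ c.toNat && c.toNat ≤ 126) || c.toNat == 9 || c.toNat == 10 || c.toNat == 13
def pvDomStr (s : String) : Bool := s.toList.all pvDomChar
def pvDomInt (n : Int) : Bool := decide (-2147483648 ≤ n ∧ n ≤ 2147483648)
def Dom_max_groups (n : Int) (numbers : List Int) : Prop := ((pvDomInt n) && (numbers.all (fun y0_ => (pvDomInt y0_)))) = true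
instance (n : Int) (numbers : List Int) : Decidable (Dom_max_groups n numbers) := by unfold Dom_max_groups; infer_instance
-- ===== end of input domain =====

-- B replaces A's filtered lists + decrement loop (and two dead repair loops) by a
-- single counting pass and the closed form even + odd // 2 (objective: simpler).

-- ===== PORT A =====
-- first while loop: current_even is never toggled inside it, so it always builds an
-- "even" group: consume an even while any remain, else two odds, else break.
-- Counts are list lengths, hence Nat; returns the final (even_count, odd_count, groups).
def pvLoop1 : Nat → Nat → Int → Nat × Nat × Int
  | e+1, o, g => pvLoop1 e o (g+1)
  | 0, o+2, g => pvLoop1 0 o (g+1)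
  | 0, o, g => (0, o, g)

-- second loop (inside `if even_count < 0 or odd_count < 0`): same even-branch body
-- (the odd branches are unreachable since current_even stays True)
def pvLoop2 : Nat → Nat → Int → Nat × Nat × Int
  | e+1, o, g => pvLoop2 e o (g+1)
  | 0, o+2, g => pvLoop2 0 o (g+1)
  | 0, o, g => (0, o, g)

-- third loop: even branch tries odd-4 before odd-2
def pvLoop3 : Nat → Nat → Int → Nat × Nat × Int
  | e+1, o, g => pvLoop3 e o (g+1)
  | 0, o+4, g => pvLoop3 0 o (g+1)
  | 0, o+2, g => pvLoop3 0 o (g+1)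
  | 0, o, g => (0, o, g)

def max_groups (n : Int) (numbers : List Int) : Int :=
  let evens := numbers.filter (fun num => PySem.Int.mod num 2 == 0)
  let odds := numbers.filter (fun num => PySem.Int.mod num 2 == 1)
  let r1 := pvLoop1 evens.length odds.length 0
  -- `if even_count < 0 or odd_count < 0:` — counts are Nats, so the test is on casts
  let r2 := if (r1.1 : Int) < 0 ∨ (r1.2.1 : Int) < 0 then pvLoop2 r1.1 r1.2.1 0 else r1
  let r3 := if (r2.1 : Int) < 0 ∨ (r2.2.1 : Int) < 0 then pvLoop3 r2.1 r2.2.1 0 else r2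
  r3.2.2

-- ===== PORT B =====
def max_groups_alt (n : Int) (numbers : List Int) : Int :=
  let p := numbers.foldl
    (fun (p : Int × Int) num =>
      if PySem.Int.mod num 2 == 0 then (p.1 + 1, p.2)
      else if PySem.Int.mod num 2 == 1 then (p.1, p.2 + 1)
      else p)
    (0, 0)
  p.1 + PySem.Int.floordiv p.2 2

-- ===== PRECONDITION & SPEC =====
def Spec_max_groups (n : Int) (numbers : List Int) (out : Int) : Prop := out = max_groups_alt n numbers
instance (n : Int) (numbers : List Int) (out : Int) : Decidable (Spec_max_groups n numbers out) := by unfold Spec_max_groups; infer_instance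

-- ===== CLAIM (what is proved, stated in full; the proofs are below) =====
def Claim_equal_max_groups : Prop := ∀ (n : Int) (numbers : List Int), Dom_max_groups n numbers → Spec_max_groups n numbers (max_groups n numbers)

-- ===== LEMMAS AND PROOFS =====

theorem pvLoop1_zero (o : Nat) : ∀ g, pvLoop1 0 o g = (0, o % 2, g + (o / 2 : Nat)) := by
  induction o using Nat.strong_induction_on with
  | _ o ih =>
    intro g
    match o with
    | 0 => simp [pvLoop1]
    | 1 => simp [pvLoop1]
    | o+2 =>
      rw [pvLoop1, ih o (by omega)]
      simp only [Prod.mk.injEq]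
      and_intros <;> first | trivial | (push_cast; omega)

theorem pvLoop1_eq (e o : Nat) : ∀ g, pvLoop1 e o g = (0, o % 2, g + e + (o / 2 : Nat)) := by
  induction e with
  | zero => intro g; rw [pvLoop1_zero]; simp
  | succ e ih =>
    intro g
    rw [pvLoop1, ih]
    simp only [Prod.mk.injEq]
    and_intros <;> first | trivial | (push_cast; omega)

theorem pvFold_count (l : List Int) (ev od : Int) :
    l.foldl
      (fun (p : Int × Int) num =>
        if PySem.Int.mod num 2 == 0 then (p.1 + 1, p.2)
        else if PySem.Int.mod num 2 == 1 then (p.1, p.2 + 1)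
        else p)
      (ev, od)
    = (ev + (l.filter (fun num => PySem.Int.mod num 2 == 0)).length,
       od + (l.filter (fun num => PySem.Int.mod num 2 == 1)).length) := by
  induction l generalizing ev od with
  | nil => simp
  | cons x xs ih =>
    have hmod : PySem.Int.mod x 2 = 0 ∨ PySem.Int.mod x 2 = 1 := PySem.Int.mod_two_eq x
    simp only [List.foldl_cons, List.filter_cons]
    rcases hmod with h | h
    · have h0 : (PySem.Int.mod x 2 == 0) = true := by rw [h]; decide
      have h1 : (PySem.Int.mod x 2 == 1) = false := by rw [h]; rfl
      simp only [h0, h1, if_true, if_false, Bool.false_eq_true, ih]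
      simp only [Prod.mk.injEq, List.length_cons]
      and_intros <;> first | trivial | (push_cast; omega)
    · have h0 : (PySem.Int.mod x 2 == 0) = false := by rw [h]; rfl
      have h1 : (PySem.Int.mod x 2 == 1) = true := by rw [h]; decide
      simp only [h0, h1, if_true, if_false, Bool.false_eq_true, ih]
      simp only [Prod.mk.injEq, List.length_cons]
      and_intros <;> first | trivial | (push_cast; omega)

-- ===== VERDICT (by name: the statement is the Claim_ definition above) =====
theorem max_groups_spec : Claim_equal_max_groups := by
  intro n numbers _
  unfold Spec_max_groups max_groups max_groups_alt
  simp only [pvLoop1_eq, pvFold_count, zero_add]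
  rw [if_neg (by omega)]
  rw [if_neg (by omega)]
  have hfd : PySem.Int.floordiv
      ((numbers.filter (fun num => PySem.Int.mod num 2 == 1)).length : Int) 2
      = (((numbers.filter (fun num => PySem.Int.mod num 2 == 1)).length / 2 : Nat) : Int) := by
    exact_mod_cast PySem.Int.floordiv_natCast _ 2
  rw [hfd]
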